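-- pv_equiv track=rewrite | github.com/daniel-reich/ubiquitous-fiesta | hY6BMxxEYycT83GPs_9.py | multiply_by_11
-- ===== SOURCE A (Python) =====
-- def multiply_by_11(n):
--     n1='0'+n
--     n2=n+'0'
--     ans=''
--     c=0
--     for i in range(len(n1)-1,-1,-1):
--         s=int(n1[i])+int(n2[i])+c
--         ans+=str(s%10)
--         c=1*(s>=10)
--     return (str(c)+ans[::-1]).lstrip('0')
-- ===== SOURCE B (Python) =====
-- def multiply_by_11(n):
--     total = 0
--     for ch in n:
--         total = total * 10 + int(ch)
--     total *= 11
--     digits = ''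
--     while total:
--         digits = str(total % 10) + digits
--         total //= 10
--     return digits
-- ===== Notes on version B (the rewrite author's own statement) =====
-- stated objective: simpler
-- what changed: A adds the digit strings '0'+n and n+'0' with a hand-written ripple-carry loop and strips leading zeros; B parses the integer value, multiplies it by 11 and emits its decimal digits directly.
import Mathlib
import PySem

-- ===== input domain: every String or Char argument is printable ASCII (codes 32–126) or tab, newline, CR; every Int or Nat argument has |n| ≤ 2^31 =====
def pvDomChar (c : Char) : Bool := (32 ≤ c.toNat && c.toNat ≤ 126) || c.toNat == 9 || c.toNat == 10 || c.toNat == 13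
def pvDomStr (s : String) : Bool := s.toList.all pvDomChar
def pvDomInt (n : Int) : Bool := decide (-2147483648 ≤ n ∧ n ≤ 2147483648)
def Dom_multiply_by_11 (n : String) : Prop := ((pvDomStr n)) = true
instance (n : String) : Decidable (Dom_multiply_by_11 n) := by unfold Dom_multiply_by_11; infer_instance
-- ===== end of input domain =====

-- B replaces A's digit-by-digit schoolbook addition of '0'+n and n+'0' (carry loop + lstrip)
-- by parsing the integer value, multiplying by 11 and emitting its decimal digits directly (objective: simpler).


-- int(s) for a one-character string s (both Pythons apply int only to single characters);
-- the .getD 0 default is unreachable under Pre_ (every character is a decimal digit).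
def pvDigit (c : Char) : Int := (PySem.Int.ofChars? [c]).getD 0

-- ===== PORT A =====
def multiply_by_11 (n : String) : String :=
  let n1 : List Char := '0' :: n.toList            -- n1 = '0' + n
  let n2 : List Char := n.toList ++ ['0']          -- n2 = n + '0'
  -- for i in range(len(n1)-1, -1, -1): state = (ans, c)
  let st := (PySem.List.pyRange (PySem.List.len n1 - 1) (-1) (-1)).foldl
    (fun (st : List Char × Int) i =>
      let s := pvDigit (PySem.List.pyGetD n1 i '0') + pvDigit (PySem.List.pyGetD n2 i '0') + st.2
      (st.1 ++ PySem.Int.toChars (PySem.Int.mod s 10), if 10 ≤ s then 1 else 0))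
    ([], 0)
  -- (str(c) + ans[::-1]).lstrip('0'); lstrip with the one-char set '0' is exactly dropWhile (· == '0')
  String.ofList (List.dropWhile (fun c => c == '0')
    (PySem.Int.toChars st.2 ++ (PySem.List.slice? st.1 none none (-1)).getD []))

-- ===== PORT B =====
-- 'while total:' — total is always ≥ 0 here (built from digits of n); the ≤ 0 guard only
-- makes the recursion total, it is the same test as Python's on every reachable state.
def pvBWhile (total : Int) (digits : List Char) : List Char :=
  if total ≤ 0 then digits
  else pvBWhile (PySem.Int.floordiv total 10) (PySem.Int.toChars (PySem.Int.mod total 10) ++ digits)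
termination_by total.toNat
decreasing_by
  rename_i h
  have h10 : PySem.Int.floordiv total 10 = total / 10 := PySem.Int.floordiv_eq_ediv_of_pos (by norm_num)
  rw [h10]; omega

def multiply_by_11_alt (n : String) : String :=
  let total := n.toList.foldl (fun t ch => t * 10 + pvDigit ch) 0
  String.ofList (pvBWhile (total * 11) [])

-- ===== PRECONDITION & SPEC =====
-- Pre_: every character of n is a decimal digit — on any other character int() raises
-- ValueError in both A and B (A never returns a value outside Pre_).
def Pre_multiply_by_11 (n : String) : Prop := n.toList.all PySem.Chars.isdigit = true
instance (n : String) : Decidable (Pre_multiply_by_11 n) := by unfold Pre_multiply_by_11; infer_instance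
def pvWitness_multiply_by_11 : String := "123"

def Spec_multiply_by_11 (n : String) (out : String) : Prop := out = multiply_by_11_alt n
instance (n : String) (out : String) : Decidable (Spec_multiply_by_11 n out) := by unfold Spec_multiply_by_11; infer_instance

-- ===== CLAIM (what is proved, stated in full; the proofs are below) =====
def Claim_equal_multiply_by_11 : Prop := ∀ (n : String), Dom_multiply_by_11 n → Pre_multiply_by_11 n → Spec_multiply_by_11 n (multiply_by_11 n)

-- ===== LEMMAS AND PROOFS =====
lemma pvDigit_eq (c : Char) (h : PySem.Chars.isdigit c = true) :
    pvDigit c = ((c.toNat - 48 : Nat) : Int) ∧ 48 ≤ c.toNat ∧ c.toNat ≤ 57 ∧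
      Nat.digitChar (c.toNat - 48) = c := by
  have hb : 48 ≤ c.toNat ∧ c.toNat ≤ 57 := by
    simp [PySem.Chars.isdigit, Char.le_def] at h
    exact ⟨h.1, h.2⟩
  have hc : c = Char.ofNat c.toNat := (Char.ofNat_toNat c).symm
  rw [hc]
  obtain ⟨h1, h2⟩ := hb
  interval_cases (c.toNat) <;> refine ⟨by decide, by decide, by decide, by decide⟩

def pvNatVal (l : List Char) : Nat := l.foldl (fun a c => 10 * a + (c.toNat - 48)) 0
def pvCanon (m : Nat) : List Char :=
  if m = 0 then [] else pvCanon (m / 10) ++ [Nat.digitChar (m % 10)]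
decreasing_by exact Nat.div_lt_self (by omega) (by norm_num)
def pvAllD (l : List Char) : Prop := ∀ c ∈ l, PySem.Chars.isdigit c = true

lemma pvNatVal_append_singleton (l : List Char) (c : Char) :
    pvNatVal (l ++ [c]) = 10 * pvNatVal l + (c.toNat - 48) := by
  simp [pvNatVal, List.foldl_append]

lemma pvFoldl_le (l : List Char) : ∀ a : Nat, a ≤ l.foldl (fun a c => 10 * a + (c.toNat - 48)) a := by
  induction l with
  | nil => simp
  | cons c t ih =>
    intro a
    have := ih (10 * a + (c.toNat - 48))
    simp only [List.foldl_cons]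
    omega

lemma pvNatVal_pos (l : List Char) (hne : l ≠ []) (hh : l.head hne ≠ '0')
    (hd : pvAllD l) : 1 ≤ pvNatVal l := by
  cases l with
  | nil => exact absurd rfl hne
  | cons c t =>
    have hc := hd c (by simp)
    obtain ⟨-, h1, h2, h3⟩ := pvDigit_eq c hc
    have hne48 : c.toNat ≠ 48 := by
      intro h
      have hc0 : c = '0' := by rw [← Char.ofNat_toNat c, h]
      simp [hc0] at hh
    have := pvFoldl_le t (10 * 0 + (c.toNat - 48))
    simp only [pvNatVal, List.foldl_cons]
    omega

lemma pvCanon_id : ∀ (E : List Char), pvAllD E → ∀ (hne : E ≠ []), E.head hne ≠ '0' → pvCanon (pvNatVal E) = E := by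
  intro E
  induction E using List.reverseRecOn with
  | nil => intro _ hne; exact absurd rfl hne
  | append_singleton F c ih =>
    intro hd hne hh
    have hc := hd c (by simp)
    obtain ⟨-, h1, h2, h3⟩ := pvDigit_eq c hc
    rw [pvNatVal_append_singleton]
    cases F with
    | nil =>
      have hcne : c ≠ '0' := by simpa using hh
      have hne48 : c.toNat ≠ 48 := by
        intro h
        exact hcne (by rw [← Char.ofNat_toNat c, h])
      simp only [pvNatVal, List.foldl_nil]
      rw [pvCanon]
      have hm : ¬ (10 * 0 + (c.toNat - 48) = 0) := by omega
      simp only [if_neg hm]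
      have : (10 * 0 + (c.toNat - 48)) / 10 = 0 := by omega
      rw [this]
      have : (10 * 0 + (c.toNat - 48)) % 10 = c.toNat - 48 := by omega
      rw [this, pvCanon]
      simp [h3]
    | cons f F' =>
      have hdF : pvAllD (f :: F') := fun x hx => hd x (List.mem_append_left [c] hx)
      have hhF : (f :: F').head (by simp) ≠ '0' := by
        simpa using hh
      have hpos := pvNatVal_pos (f :: F') (by simp) hhF hdF
      have ihF := ih hdF (by simp) hhF
      rw [pvCanon]
      have hm : ¬ (10 * pvNatVal (f :: F') + (c.toNat - 48) = 0) := by omega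
      simp only [if_neg hm]
      have hdiv : (10 * pvNatVal (f :: F') + (c.toNat - 48)) / 10 = pvNatVal (f :: F') := by omega
      have hmod : (10 * pvNatVal (f :: F') + (c.toNat - 48)) % 10 = c.toNat - 48 := by omega
      rw [hdiv, hmod, ihF, h3]

lemma pvCanon_natVal (l : List Char) (hd : pvAllD l) :
    l.dropWhile (fun c => c == '0') = pvCanon (pvNatVal l) := by
  induction l with
  | nil => rw [pvCanon]; simp [pvNatVal]
  | cons c t ih =>
    by_cases hc : c = '0'
    · subst hc
      rw [List.dropWhile_cons_of_pos (by decide)]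
      have : pvNatVal ('0' :: t) = pvNatVal t := by simp [pvNatVal]
      rw [this]
      exact ih (fun x hx => hd x (by simp [hx]))
    · rw [List.dropWhile_cons_of_neg (by simpa using hc)]
      exact (pvCanon_id (c :: t) hd (by simp) (by simpa using hc)).symm

lemma pvToChars_small (r : Nat) (h : r < 10) :
    PySem.Int.toChars (r : Int) = [Nat.digitChar r] := by
  interval_cases r <;> decide

lemma pvBWhile_spec (m : Nat) : ∀ acc, pvBWhile (m : Int) acc = pvCanon m ++ acc := by
  induction m using Nat.strong_induction_on with
  | _ m ih =>
    intro acc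
    rw [pvBWhile, pvCanon]
    by_cases hm : m = 0
    · simp [hm]
    · have hpos : ¬ ((m : Int) ≤ 0) := by omega
      simp only [if_neg hpos, if_neg hm]
      have hdiv : PySem.Int.floordiv (m : Int) 10 = ((m / 10 : Nat) : Int) := by
        rw [PySem.Int.floordiv_eq_ediv_of_pos (by norm_num)]
        omega
      have hmod : PySem.Int.mod (m : Int) 10 = ((m % 10 : Nat) : Int) := by
        rw [PySem.Int.mod_eq_emod_of_pos (by norm_num)]
        omega
      rw [hdiv, hmod, pvToChars_small _ (Nat.mod_lt _ (by norm_num)),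
          ih (m / 10) (Nat.div_lt_self (by omega) (by norm_num))]
      simp

lemma pvTotal_spec (l : List Char) (hd : pvAllD l) : ∀ a : Nat,
    l.foldl (fun t ch => t * 10 + pvDigit ch) (a : Int)
      = ((l.foldl (fun a c => 10 * a + (c.toNat - 48)) a : Nat) : Int) := by
  induction l with
  | nil => intro a; simp
  | cons c t ih =>
    intro a
    obtain ⟨hdig, h1, h2, -⟩ := pvDigit_eq c (hd c (by simp))
    have ihc := ih (fun x hx => hd x (by simp [hx])) (10 * a + (c.toNat - 48))
    simp only [List.foldl_cons, hdig]
    rw [← ihc]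
    congr 1
    push_cast
    ring

lemma pvStep_char (s : Int) (h0 : 0 ≤ s) (h19 : s ≤ 19) :
    PySem.Int.toChars (PySem.Int.mod s 10) = [Nat.digitChar (s.toNat % 10)] ∧
    PySem.Chars.isdigit (Nat.digitChar (s.toNat % 10)) = true ∧
    (Nat.digitChar (s.toNat % 10)).toNat - 48 = s.toNat % 10 := by
  interval_cases s <;> exact ⟨by decide, by decide, by decide⟩

lemma pvGo_spec (xs ys : List Char) (hx : pvAllD xs) (hy : pvAllD ys) :
    ∀ (i : Nat), i < xs.length → i < ys.length →
    ∀ (ans : List Char) (c : Int), (c = 0 ∨ c = 1) →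
    ∃ (δ : List Char) (c' : Int),
      (PySem.List.pyRange (i : Int) (-1) (-1)).foldl
        (fun (st : List Char × Int) j =>
          let s := pvDigit (PySem.List.pyGetD xs j '0') + pvDigit (PySem.List.pyGetD ys j '0') + st.2
          (st.1 ++ PySem.Int.toChars (PySem.Int.mod s 10), if 10 ≤ s then 1 else 0))
        (ans, c)
      = (ans ++ δ, c')
      ∧ (c' = 0 ∨ c' = 1) ∧ pvAllD δ ∧ δ.length = i + 1
      ∧ c'.toNat * 10 ^ (i + 1) + pvNatVal δ.reverse
          = pvNatVal (xs.take (i + 1)) + pvNatVal (ys.take (i + 1)) + c.toNat := by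
  intro i
  induction i generalizing xs ys with
  | zero =>
    intro hxl hyl ans c hc
    rw [PySem.List.pyRange_neg_one_cons (by norm_num)]
    simp only [List.foldl_cons]
    rw [show ((0:Nat):Int) - 1 = -1 from by norm_num, PySem.List.pyRange_neg_one_eq_nil le_rfl]
    simp only [List.foldl_nil, PySem.List.pyGetD_natCast, List.getD_eq_getElem _ _ hxl,
      List.getD_eq_getElem _ _ hyl]
    obtain ⟨hdx, hx1, hx2, -⟩ := pvDigit_eq xs[0] (hx _ (List.getElem_mem hxl))
    obtain ⟨hdy, hy1, hy2, -⟩ := pvDigit_eq ys[0] (hy _ (List.getElem_mem hyl))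
    set s : Int := pvDigit xs[0] + pvDigit ys[0] + c with hs
    have hs0 : 0 ≤ s := by rw [hs, hdx, hdy]; omega
    have hs19 : s ≤ 19 := by rw [hs, hdx, hdy]; omega
    obtain ⟨hch, hchd, hchv⟩ := pvStep_char s hs0 hs19
    refine ⟨[Nat.digitChar (s.toNat % 10)], if 10 ≤ s then 1 else 0, by rw [hch], ?_, ?_, rfl, ?_⟩
    · split <;> simp
    · intro x hxm; simp at hxm; rw [hxm]; exact hchd
    · have htx : xs.take 1 = [xs[0]] := by
        rw [List.take_add_one, List.take_zero, List.getElem?_eq_getElem hxl]; rfl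
      have hty : ys.take 1 = [ys[0]] := by
        rw [List.take_add_one, List.take_zero, List.getElem?_eq_getElem hyl]; rfl
      rw [htx, hty]
      simp only [pvNatVal, List.reverse_singleton, List.foldl_cons, List.foldl_nil]
      have hsn : s.toNat = (xs[0].toNat - 48) + (ys[0].toNat - 48) + c.toNat := by
        rw [hs, hdx, hdy]; rcases hc with rfl | rfl <;> omega
      have hcarry : (if 10 ≤ s then (1:Int) else 0).toNat = s.toNat / 10 := by
        split <;> omega
      rw [hcarry, hchv]
      rcases hc with rfl | rfl <;> omega
  | succ i ih =>
    intro hxl hyl ans c hc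
    rw [PySem.List.pyRange_neg_one_cons (by push_cast; omega)]
    simp only [List.foldl_cons]
    rw [show ((i+1:Nat):Int) - 1 = ((i:Nat):Int) from by push_cast; ring]
    simp only [PySem.List.pyGetD_natCast, List.getD_eq_getElem _ _ hxl,
      List.getD_eq_getElem _ _ hyl]
    obtain ⟨hdx, hx1, hx2, -⟩ := pvDigit_eq xs[i+1] (hx _ (List.getElem_mem hxl))
    obtain ⟨hdy, hy1, hy2, -⟩ := pvDigit_eq ys[i+1] (hy _ (List.getElem_mem hyl))
    set s : Int := pvDigit xs[i+1] + pvDigit ys[i+1] + c with hs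
    have hs0 : 0 ≤ s := by rw [hs, hdx, hdy]; rcases hc with rfl | rfl <;> omega
    have hs19 : s ≤ 19 := by rw [hs, hdx, hdy]; rcases hc with rfl | rfl <;> omega
    obtain ⟨hch, hchd, hchv⟩ := pvStep_char s hs0 hs19
    have hc2 : (if 10 ≤ s then (1:Int) else 0) = 0 ∨ (if 10 ≤ s then (1:Int) else 0) = 1 := by
      split <;> simp
    obtain ⟨δ', c', hfold, hc', hδ', hlen', hval⟩ :=
      ih xs ys hx hy (by omega) (by omega)
        (ans ++ PySem.Int.toChars (PySem.Int.mod s 10)) (if 10 ≤ s then 1 else 0) hc2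
    refine ⟨Nat.digitChar (s.toNat % 10) :: δ', c', ?_, hc', ?_, by simp [hlen'], ?_⟩
    · rw [hfold, hch]; simp
    · intro x hxm
      rcases List.mem_cons.mp hxm with rfl | hxm
      · exact hchd
      · exact hδ' x hxm
    · have htx : xs.take (i+2) = xs.take (i+1) ++ [xs[i+1]] := by
        rw [List.take_add_one, List.getElem?_eq_getElem hxl]; rfl
      have hty : ys.take (i+2) = ys.take (i+1) ++ [ys[i+1]] := by
        rw [List.take_add_one, List.getElem?_eq_getElem hyl]; rfl
      rw [htx, hty, pvNatVal_append_singleton, pvNatVal_append_singleton]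
      simp only [List.reverse_cons]
      rw [pvNatVal_append_singleton, hchv]
      have hsn : s.toNat = (xs[i+1].toNat - 48) + (ys[i+1].toNat - 48) + c.toNat := by
        rw [hs, hdx, hdy]; rcases hc with rfl | rfl <;> omega
      have hcarry : (if 10 ≤ s then (1:Int) else 0).toNat = s.toNat / 10 := by
        split <;> omega
      rw [hcarry] at hval
      have hpow : (10:Nat) ^ (i + 1 + 1) = 10 * 10 ^ (i + 1) := by ring
      rw [hpow]
      rcases hc' with rfl | rfl <;> rcases hc with rfl | rfl <;>
        simp only [Int.toNat_zero, Int.toNat_one] at hval ⊢ <;> omega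

lemma pvFoldl_shift (t : List Char) : ∀ a : Nat,
    t.foldl (fun a c => 10 * a + (c.toNat - 48)) a = a * 10 ^ t.length + pvNatVal t := by
  induction t with
  | nil => intro a; simp [pvNatVal]
  | cons c t ih =>
    intro a
    simp only [List.foldl_cons, List.length_cons]
    rw [ih (10 * a + (c.toNat - 48)), show pvNatVal (c :: t) = t.foldl (fun a c => 10 * a + (c.toNat - 48)) (10 * 0 + (c.toNat - 48)) from rfl, ih (10 * 0 + (c.toNat - 48))]
    ring

lemma pvNatVal_cons (c : Char) (t : List Char) :
    pvNatVal (c :: t) = (c.toNat - 48) * 10 ^ t.length + pvNatVal t := by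
  rw [show pvNatVal (c :: t) = t.foldl (fun a c => 10 * a + (c.toNat - 48)) (10 * 0 + (c.toNat - 48)) from rfl, pvFoldl_shift]
  ring

lemma pvMain (n : String) (hpre : n.toList.all PySem.Chars.isdigit = true) :
    multiply_by_11 n = multiply_by_11_alt n := by
  have hd : pvAllD n.toList := fun c hc => (List.all_eq_true.mp hpre) c hc
  set l := n.toList with hl
  have hd1 : pvAllD ('0' :: l) := by
    intro x hx
    rcases List.mem_cons.mp hx with rfl | hx
    · decide
    · exact hd x hx
  have hd2 : pvAllD (l ++ ['0']) := by
    intro x hx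
    rcases List.mem_append.mp hx with hx | hx
    · exact hd x hx
    · simp at hx; rw [hx]; decide
  obtain ⟨δ, c', hfold, hc', hδ, hlen, hval⟩ :=
    pvGo_spec ('0' :: l) (l ++ ['0']) hd1 hd2 l.length (by simp) (by simp) [] 0 (Or.inl rfl)
  -- A's value
  have hA : multiply_by_11 n = String.ofList (List.dropWhile (fun c => c == '0')
      (PySem.Int.toChars c' ++ δ.reverse)) := by
    simp only [multiply_by_11]
    rw [show PySem.List.len ('0' :: n.toList) - 1 = ((n.toList.length : Nat) : Int) from by
      simp [PySem.List.len_eq]]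
    rw [← hl, hfold]
    simp [PySem.List.slice?_none_none_neg_one]
  -- value of the digit string A strips
  have htake1 : ('0' :: l).take (l.length + 1) = '0' :: l := List.take_of_length_le (by simp)
  have htake2 : (l ++ ['0']).take (l.length + 1) = l ++ ['0'] := List.take_of_length_le (by simp)
  rw [htake1, htake2] at hval
  have hv1 : pvNatVal ('0' :: l) = pvNatVal l := by simp [pvNatVal]
  have hv2 : pvNatVal (l ++ ['0']) = 10 * pvNatVal l := by
    rw [pvNatVal_append_singleton, show '0'.toNat - 48 = 0 from by decide]
    omega
  rw [hv1, hv2] at hval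
  -- E = toChars c' ++ δ.reverse is a digit string of value 11 * pvNatVal l
  have hdrev : pvAllD δ.reverse := fun x hx => hδ x (List.mem_reverse.mp hx)
  have hE : List.dropWhile (fun c => c == '0') (PySem.Int.toChars c' ++ δ.reverse)
      = pvCanon (11 * pvNatVal l) := by
    rcases hc' with rfl | rfl
    · rw [show PySem.Int.toChars 0 = ['0'] from rfl]
      have hdE : pvAllD ('0' :: δ.reverse) := by
        intro x hx
        rcases List.mem_cons.mp hx with rfl | hx
        · decide
        · exact hdrev x hx
      rw [show (['0'] ++ δ.reverse) = '0' :: δ.reverse from rfl, pvCanon_natVal _ hdE]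
      congr 1
      simp only [pvNatVal] at *
      simp only [List.foldl_cons] at *
      rw [show 10 * 0 + ('0'.toNat - 48) = 0 from by decide]
      simp only [Int.toNat_zero, Nat.zero_mul, Nat.zero_add] at hval
      omega
    · rw [show PySem.Int.toChars 1 = ['1'] from rfl]
      have hdE : pvAllD ('1' :: δ.reverse) := by
        intro x hx
        rcases List.mem_cons.mp hx with rfl | hx
        · decide
        · exact hdrev x hx
      rw [show (['1'] ++ δ.reverse) = '1' :: δ.reverse from rfl, pvCanon_natVal _ hdE]
      congr 1
      rw [pvNatVal_cons]
      have : δ.reverse.length = l.length + 1 := by simp [hlen]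
      rw [this]
      rw [show '1'.toNat - 48 = 1 from by decide]
      simp only [Int.toNat_one, one_mul] at hval ⊢
      omega
  -- B's value
  have hB : multiply_by_11_alt n = String.ofList (pvCanon (pvNatVal l * 11)) := by
    simp only [multiply_by_11_alt]
    rw [← hl]
    rw [show (0 : Int) = ((0 : Nat) : Int) from rfl, pvTotal_spec l hd 0]
    rw [show ((l.foldl (fun a c => 10 * a + (c.toNat - 48)) 0 : Nat) : Int) * 11
        = (((l.foldl (fun a c => 10 * a + (c.toNat - 48)) 0 * 11 : Nat)) : Int) from by push_cast; ring]
    rw [pvBWhile_spec]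
    simp [pvNatVal]
  rw [hA, hE, hB, Nat.mul_comm]


-- ===== VERDICT (by name: the statement is the Claim_ definition above) =====
theorem multiply_by_11_spec : Claim_equal_multiply_by_11 := by
  intro n _ hpre
  unfold Spec_multiply_by_11
  exact pvMain n hpre
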